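-- pv_equiv track=rewrite | github.com/rohanthomas1202/Shipyard | agent/graph.py | _retry_count
-- ===== SOURCE A (Python) =====
-- def _retry_count(state: dict) -> int:
--     count = 0
--     for entry in reversed(state.get("edit_history", [])):
--         if entry.get("error"):
--             count += 1
--         else:
--             break
--     return count
-- ===== SOURCE B (Python) =====
-- def _retry_count(state: dict) -> int:
--     count = 0
--     for entry in state.get("edit_history", []):
--         count = count + 1 if entry.get("error") else 0
--     return count
-- ===== Notes on version B (the rewrite author's own statement) =====
-- stated objective: alternative
-- what changed: Forward single pass with a reset-on-non-error counter replaces A's reversed traversal with an early break.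
import Mathlib
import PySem

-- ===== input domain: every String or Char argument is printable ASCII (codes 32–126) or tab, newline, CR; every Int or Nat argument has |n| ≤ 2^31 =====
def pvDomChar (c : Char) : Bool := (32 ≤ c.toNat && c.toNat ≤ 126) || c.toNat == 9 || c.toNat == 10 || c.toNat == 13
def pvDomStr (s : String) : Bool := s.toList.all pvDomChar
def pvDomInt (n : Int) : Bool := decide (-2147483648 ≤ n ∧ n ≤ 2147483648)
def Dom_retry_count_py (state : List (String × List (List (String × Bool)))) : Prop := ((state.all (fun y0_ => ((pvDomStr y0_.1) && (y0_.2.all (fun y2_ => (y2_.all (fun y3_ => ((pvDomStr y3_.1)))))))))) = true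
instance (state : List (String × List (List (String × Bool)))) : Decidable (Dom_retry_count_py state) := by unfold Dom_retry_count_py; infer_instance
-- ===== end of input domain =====

-- B scans the history forward with a reset-on-non-error counter instead of A's reversed scan with break (alternative decomposition, same cost).


-- ===== PORT A =====
-- helper: A's reversed loop with break, as structural recursion
def retryLoopA : List (List (String × Bool)) → Int
  | [] => 0
  | e :: rest => if (PySem.Dict.mk e).getD "error" false then retryLoopA rest + 1 else 0

def retry_count_py (state : List (String × List (List (String × Bool)))) : Int :=
  retryLoopA (((PySem.Dict.mk state).getD "edit_history" []).reverse)

-- ===== PORT B =====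
def retry_count_py_alt (state : List (String × List (List (String × Bool)))) : Int :=
  ((PySem.Dict.mk state).getD "edit_history" []).foldl
    (fun c e => if (PySem.Dict.mk e).getD "error" false then c + 1 else 0) 0

-- ===== PRECONDITION & SPEC =====
def Spec_retry_count_py (state : List (String × List (List (String × Bool)))) (out : Int) : Prop := out = retry_count_py_alt state
instance (state : List (String × List (List (String × Bool)))) (out : Int) : Decidable (Spec_retry_count_py state out) := by unfold Spec_retry_count_py; infer_instance

-- ===== CLAIM (what is proved, stated in full; the proofs are below) =====
def Claim_equal_retry_count_py : Prop := ∀ (state : List (String × List (List (String × Bool)))), Dom_retry_count_py state → Spec_retry_count_py state (retry_count_py state)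

-- ===== LEMMAS AND PROOFS =====

-- ===== VERDICT (by name: the statement is the Claim_ definition above) =====
theorem retry_foldl_eq_loopA (l : List (List (String × Bool))) :
    l.foldl (fun c e => if (PySem.Dict.mk e).getD "error" false then c + 1 else 0) 0
      = retryLoopA l.reverse := by
  induction l using List.reverseRecOn with
  | nil => rfl
  | append_singleton l e ih =>
      simp [List.foldl_append, retryLoopA, ih]

theorem retry_count_py_spec : Claim_equal_retry_count_py := by
  intro state _
  unfold Spec_retry_count_py retry_count_py retry_count_py_alt
  exact (retry_foldl_eq_loopA _).symm
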